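-- pv_equiv track=rewrite | github.com/natferlima/restaurant-orders-trybe | src/analyze_log.py | days_customer_was_not
-- ===== SOURCE A (Python) =====
-- def days_customer_was_not(data_list, customer):
--     days_customer_was = set()
--     all_days = set()
--     for person, dish, day in data_list:
--         if person == customer:
--             days_customer_was.add(day)
--         all_days.add(day)
--     return all_days.difference(days_customer_was)
-- ===== SOURCE B (Python) =====
-- def days_customer_was_not(data_list, customer):
--     return {day
--             for _, _, day in data_list
--             if not any(p == customer and d == day for p, _, d in data_list)}
-- ===== Notes on version B (the rewrite author's own statement) =====
-- stated objective: alternative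
-- what changed: Replaces the stateful single pass that maintains two sets and takes their difference with a stateless brute-force set comprehension: a day is kept iff a full rescan of the list finds no record of the customer on that day (O(n^2) nested scans instead of O(n) set maintenance).
import Mathlib
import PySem

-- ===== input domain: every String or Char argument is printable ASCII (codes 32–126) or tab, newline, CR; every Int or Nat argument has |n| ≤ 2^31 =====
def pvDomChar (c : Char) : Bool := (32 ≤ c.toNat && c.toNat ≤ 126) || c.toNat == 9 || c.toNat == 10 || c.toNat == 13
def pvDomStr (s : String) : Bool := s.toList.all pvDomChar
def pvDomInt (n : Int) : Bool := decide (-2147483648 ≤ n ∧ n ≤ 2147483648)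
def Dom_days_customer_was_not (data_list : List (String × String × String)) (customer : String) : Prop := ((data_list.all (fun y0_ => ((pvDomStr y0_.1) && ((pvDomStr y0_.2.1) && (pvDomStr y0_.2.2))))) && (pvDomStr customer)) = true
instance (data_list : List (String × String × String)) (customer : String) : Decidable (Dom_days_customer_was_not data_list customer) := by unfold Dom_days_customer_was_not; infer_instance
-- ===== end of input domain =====

-- B replaces A's stateful pass (two sets + difference) with a stateless quadratic set
-- comprehension: keep a day iff a rescan of the list finds no customer record on that day.

-- ===== PORT A =====
-- Port of A: one pass keeping (days_customer_was, all_days) as Python sets, then set difference.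
def days_customer_was_not (data_list : List (String × String × String)) (customer : String) : List String :=
  let st := data_list.foldl
    (fun (p : PySem.Set String × PySem.Set String) t =>
      (if t.1 == customer then PySem.Set.add p.1 t.2.2 else p.1,
       PySem.Set.add p.2 t.2.2))
    (PySem.Set.empty, PySem.Set.empty)
  PySem.Set.diff st.2 st.1

-- ===== PORT B =====
-- Port of B: set comprehension over data_list; a day is included iff no record in
-- data_list has that day with person == customer (the inner 'any' rescan).
def days_customer_was_not_alt (data_list : List (String × String × String)) (customer : String) : List String :=
  data_list.foldl
    (fun (s : PySem.Set String) t =>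
      if !(data_list.any (fun u => u.1 == customer && u.2.2 == t.2.2))
      then PySem.Set.add s t.2.2 else s)
    PySem.Set.empty

-- ===== PRECONDITION & SPEC =====
def Spec_days_customer_was_not (data_list : List (String × String × String)) (customer : String) (out : List String) : Prop := out = days_customer_was_not_alt data_list customer
instance (data_list : List (String × String × String)) (customer : String) (out : List String) : Decidable (Spec_days_customer_was_not data_list customer out) := by unfold Spec_days_customer_was_not; infer_instance

-- ===== CLAIM (what is proved, stated in full; the proofs are below) =====
def Claim_equal_days_customer_was_not : Prop := ∀ (data_list : List (String × String × String)) (customer : String), Dom_days_customer_was_not data_list customer → Spec_days_customer_was_not data_list customer (days_customer_was_not data_list customer)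

-- ===== LEMMAS AND PROOFS =====

-- A's pair-fold splits into two independent folds.
theorem pvFold_split (customer : String) (l : List (String × String × String))
    (v a : PySem.Set String) :
    l.foldl
      (fun (p : PySem.Set String × PySem.Set String) t =>
        (if t.1 == customer then PySem.Set.add p.1 t.2.2 else p.1,
         PySem.Set.add p.2 t.2.2)) (v, a)
    = (l.foldl (fun s t => if t.1 == customer then PySem.Set.add s t.2.2 else s) v,
       l.foldl (fun s t => PySem.Set.add s t.2.2) a) := by
  induction l generalizing v a with
  | nil => rfl
  | cons t l ih => simp only [List.foldl_cons, ih]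

-- Membership in A's visited set = the inner 'any' rescan of B.
theorem pvVisited_mem (customer : String) (l : List (String × String × String))
    (v : PySem.Set String) (x : String) :
    x ∈ l.foldl (fun s t => if t.1 == customer then PySem.Set.add s t.2.2 else s) v
    ↔ x ∈ v ∨ ∃ t ∈ l, t.1 = customer ∧ t.2.2 = x := by
  induction l generalizing v with
  | nil => simp
  | cons t l ih =>
    simp only [List.foldl_cons, ih, List.mem_cons]
    by_cases h : t.1 = customer
    · simp [h, PySem.Set.mem_add]
      tauto
    · simp [h]

-- diff commutes with a single add on the left set.
theorem pvDiff_add (a v : PySem.Set String) (d : String) :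
    PySem.Set.diff (PySem.Set.add a d) v
    = if d ∉ v then PySem.Set.add (PySem.Set.diff a v) d else PySem.Set.diff a v := by
  by_cases hm : d ∈ a
  · rw [PySem.Set.add_of_mem hm]
    by_cases hv : d ∈ v
    · simp [hv]
    · rw [if_pos hv]
      rw [PySem.Set.add_of_mem]
      exact (PySem.Set.mem_diff _ _ _).mpr ⟨hm, hv⟩
  · rw [PySem.Set.add_of_not_mem hm]
    by_cases hv : d ∈ v
    · simp only [hv, not_true_eq_false, if_false]
      simp [PySem.Set.diff, List.filter_append, hv]
    · rw [if_pos hv]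
      rw [PySem.Set.add_of_not_mem (fun h => hm ((PySem.Set.mem_diff _ _ _).mp h).1)]
      simp [PySem.Set.diff, List.filter_append, hv]

-- Folding adds then diffing = folding conditional adds.
theorem pvDiff_fold (l : List (String × String × String)) (v a : PySem.Set String)
    (q : String → Bool) (hq : ∀ x, q x = true ↔ x ∉ v) :
    PySem.Set.diff (l.foldl (fun s t => PySem.Set.add s t.2.2) a) v
    = l.foldl (fun s t => if q t.2.2 then PySem.Set.add s t.2.2 else s)
        (PySem.Set.diff a v) := by
  induction l generalizing a with
  | nil => rfl
  | cons t l ih =>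
    simp only [List.foldl_cons]
    rw [ih (PySem.Set.add a t.2.2), pvDiff_add]
    by_cases hv : t.2.2 ∈ v
    · rw [if_neg (by simpa using hv), if_neg (by simp [hq, hv])]
    · rw [if_pos hv, if_pos ((hq _).mpr hv)]

-- ===== VERDICT (by name: the statement is the Claim_ definition above) =====
theorem days_customer_was_not_spec : Claim_equal_days_customer_was_not := by
  intro data_list customer _
  unfold Spec_days_customer_was_not days_customer_was_not days_customer_was_not_alt
  simp only [pvFold_split]
  have := pvDiff_fold data_list
    (data_list.foldl (fun s t => if t.1 == customer then PySem.Set.add s t.2.2 else s)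
      PySem.Set.empty)
    PySem.Set.empty
    (fun x => !(data_list.any (fun u => u.1 == customer && u.2.2 == x)))
    (by
      intro x
      rw [pvVisited_mem]
      simp
      constructor
      · intro h y hy
        exact h customer y x hy rfl rfl
      · rintro h a b c hc rfl rfl
        exact h b hc)
  simpa using this
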